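-- pv_equiv track=rewrite | github.com/pypi-data/pypi-mirror-402 | packages/mykrok/mykrok-1.4.1.tar.gz/mykrok-1.4.1/worktrees/enh-more-metadata/scripts/generate_screenshots.py | generate_readme_section
-- ===== SOURCE A (Python) =====
-- def generate_readme_section(screenshots: list[tuple[str, str]]) -> str:
--     """Generate markdown for README.md screenshots section."""
--     lines = [
--         "## Screenshots",
--         "",
--         "The unified web frontend provides a complete activity browsing experience.",
--         "Screenshots are auto-generated from the demo dataset (`tox -e screenshots`).",
--         "",
--     ]
--
--     # Group screenshots by view
--     views = {
--         "Map View": ["01-", "02-", "03-"],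
--         "Sessions View": ["04-", "05-", "06-"],
--         "Session Detail": ["07-", "08-"],
--         "Statistics": ["09-", "10-"],
--     }
--
--     for view_name, prefixes in views.items():
--         view_screenshots = [
--             (f, c) for f, c in screenshots if any(f.startswith(p) for p in prefixes)
--         ]
--         if view_screenshots:
--             lines.append(f"### {view_name}")
--             lines.append("")
--             for filename, caption in view_screenshots:
--                 lines.append(f"![{caption}](docs/screenshots/{filename})")
--                 lines.append(f"*{caption}*")
--                 lines.append("")
--
--     lines.append("---")
--     lines.append("*Screenshots generated with `tox -e screenshots`*")
--     lines.append("")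
--
--     return "\n".join(lines)
-- ===== SOURCE B (Python) =====
-- def generate_readme_section(screenshots: list[tuple[str, str]]) -> str:
--     """Generate markdown for README.md screenshots section."""
--     views = [
--         ("Map View", ("01-", "02-", "03-")),
--         ("Sessions View", ("04-", "05-", "06-")),
--         ("Session Detail", ("07-", "08-")),
--         ("Statistics", ("09-", "10-")),
--     ]
--     # single dispatch pass: each screenshot goes to the first view whose prefixes match
--     groups = {name: [] for name, _ in views}
--     for f, c in screenshots:
--         for name, prefixes in views:
--             if f.startswith(prefixes):
--                 groups[name].append((f, c))
--                 break
--     sections = []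
--     for name, _ in views:
--         group = groups[name]
--         if group:
--             sections.append(f"### {name}")
--             sections.append("")
--             for filename, caption in group:
--                 sections.extend([
--                     f"![{caption}](docs/screenshots/{filename})",
--                     f"*{caption}*",
--                     "",
--                 ])
--     lines = [
--         "## Screenshots",
--         "",
--         "The unified web frontend provides a complete activity browsing experience.",
--         "Screenshots are auto-generated from the demo dataset (`tox -e screenshots`).",
--         "",
--     ] + sections + [
--         "---",
--         "*Screenshots generated with `tox -e screenshots`*",
--         "",
--     ]
--     return "\n".join(lines)
-- ===== Notes on version B (the rewrite author's own statement) =====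
-- stated objective: alternative
-- what changed: Replaced A's four full rescans of screenshots (one filter per view) with a single dispatch pass that assigns each screenshot to the first view whose prefixes match, followed by a grouped emit over the views in order.
import Mathlib
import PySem

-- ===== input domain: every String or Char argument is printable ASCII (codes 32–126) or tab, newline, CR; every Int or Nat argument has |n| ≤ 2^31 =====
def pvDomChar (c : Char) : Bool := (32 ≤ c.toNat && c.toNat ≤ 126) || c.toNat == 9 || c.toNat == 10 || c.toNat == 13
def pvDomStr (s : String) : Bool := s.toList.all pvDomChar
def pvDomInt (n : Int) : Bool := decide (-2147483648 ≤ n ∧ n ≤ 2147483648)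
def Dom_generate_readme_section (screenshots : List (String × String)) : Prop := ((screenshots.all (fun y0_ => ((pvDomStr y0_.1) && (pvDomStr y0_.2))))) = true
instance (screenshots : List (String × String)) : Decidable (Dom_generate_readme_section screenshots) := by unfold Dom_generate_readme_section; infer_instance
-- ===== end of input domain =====

-- B replaces A's four full rescans of `screenshots` with one dispatch pass into
-- per-view groups followed by a grouped emit (objective: alternative decomposition).

-- shared rendering of one screenshot's three markdown lines (identical f-strings in both Pythons)
def pvRender (fc : String × String) : List String :=
  ["![" ++ fc.2 ++ "](docs/screenshots/" ++ fc.1 ++ ")", "*" ++ fc.2 ++ "*", ""]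

def pvHeader : List String :=
  ["## Screenshots", "",
   "The unified web frontend provides a complete activity browsing experience.",
   "Screenshots are auto-generated from the demo dataset (`tox -e screenshots`).",
   ""]

def pvFooter : List String :=
  ["---", "*Screenshots generated with `tox -e screenshots`*", ""]

-- ===== PORT A =====
def pvViewsA : List (String × List String) :=
  [("Map View", ["01-", "02-", "03-"]),
   ("Sessions View", ["04-", "05-", "06-"]),
   ("Session Detail", ["07-", "08-"]),
   ("Statistics", ["09-", "10-"])]

def generate_readme_section (screenshots : List (String × String)) : String :=
  let lines := pvViewsA.foldl (fun lines vp =>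
    let view_screenshots :=
      screenshots.filter (fun fc => vp.2.any (fun p => PySem.Str.startswith fc.1 p))
    if view_screenshots ≠ [] then
      view_screenshots.foldl
        (fun ls fc => ls ++ [(pvRender fc)[0]!] ++ [(pvRender fc)[1]!] ++ [(pvRender fc)[2]!])
        (lines ++ ["### " ++ vp.1] ++ [""])
    else lines) pvHeader
  PySem.Str.join "\n" ((lines ++ ["---"] ++ ["*Screenshots generated with `tox -e screenshots`*"]) ++ [""])

-- ===== PORT B =====
-- f.startswith(("01-","02-","03-")) etc., one Bool test per view
def pvMatch1 (f : String) : Bool :=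
  PySem.Str.startswith f "01-" || PySem.Str.startswith f "02-" || PySem.Str.startswith f "03-"
def pvMatch2 (f : String) : Bool :=
  PySem.Str.startswith f "04-" || PySem.Str.startswith f "05-" || PySem.Str.startswith f "06-"
def pvMatch3 (f : String) : Bool :=
  PySem.Str.startswith f "07-" || PySem.Str.startswith f "08-"
def pvMatch4 (f : String) : Bool :=
  PySem.Str.startswith f "09-" || PySem.Str.startswith f "10-"

-- the dispatch loop body: append (f,c) to the first matching view's group (break)
def pvDispatch
    (st : List (String × String) × List (String × String) × List (String × String) × List (String × String))
    (fc : String × String) :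
    List (String × String) × List (String × String) × List (String × String) × List (String × String) :=
  if pvMatch1 fc.1 then (st.1 ++ [fc], st.2.1, st.2.2.1, st.2.2.2)
  else if pvMatch2 fc.1 then (st.1, st.2.1 ++ [fc], st.2.2.1, st.2.2.2)
  else if pvMatch3 fc.1 then (st.1, st.2.1, st.2.2.1 ++ [fc], st.2.2.2)
  else if pvMatch4 fc.1 then (st.1, st.2.1, st.2.2.1, st.2.2.2 ++ [fc])
  else st

-- grouped emit of one view's section (empty group → nothing)
def pvSection (name : String) (g : List (String × String)) : List String :=
  if g = [] then []
  else ["### " ++ name, ""] ++ g.flatMap pvRender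

def generate_readme_section_alt (screenshots : List (String × String)) : String :=
  let g := screenshots.foldl pvDispatch ([], [], [], [])
  let sections :=
    pvSection "Map View" g.1 ++ pvSection "Sessions View" g.2.1 ++
    pvSection "Session Detail" g.2.2.1 ++ pvSection "Statistics" g.2.2.2
  PySem.Str.join "\n" (pvHeader ++ sections ++ pvFooter)

-- ===== PRECONDITION & SPEC =====
def Spec_generate_readme_section (screenshots : List (String × String)) (out : String) : Prop := out = generate_readme_section_alt screenshots
instance (screenshots : List (String × String)) (out : String) : Decidable (Spec_generate_readme_section screenshots out) := by unfold Spec_generate_readme_section; infer_instance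

-- ===== CLAIM (what is proved, stated in full; the proofs are below) =====
def Claim_equal_generate_readme_section : Prop := ∀ (screenshots : List (String × String)), Dom_generate_readme_section screenshots → Spec_generate_readme_section screenshots (generate_readme_section screenshots)

-- ===== LEMMAS AND PROOFS =====

-- two equal-length prefixes of the same string are equal; hence distinct "NN-" prefixes are mutually exclusive
theorem pv_sw_ne (f p q : String) (h : PySem.Str.startswith f p = true)
    (hlen : p.toList.length = q.toList.length) (hne : p.toList ≠ q.toList) :
    PySem.Str.startswith f q = false := by
  by_contra hq
  rw [Bool.not_eq_false] at hq
  rw [PySem.Str.startswith_eq, PySem.Chars.startswith_iff, List.prefix_iff_eq_take] at h hq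
  exact hne (h.trans (hlen ▸ hq.symm))

theorem pv_mutex12 (f : String) (h : pvMatch1 f = true) : pvMatch2 f = false := by
  simp only [pvMatch1, Bool.or_eq_true] at h
  simp only [pvMatch2, Bool.or_eq_false_iff]
  rcases h with (h | h) | h <;>
    exact ⟨⟨pv_sw_ne f _ _ h (by decide) (by decide), pv_sw_ne f _ _ h (by decide) (by decide)⟩,
           pv_sw_ne f _ _ h (by decide) (by decide)⟩

theorem pv_mutex13 (f : String) (h : pvMatch1 f = true) : pvMatch3 f = false := by
  simp only [pvMatch1, Bool.or_eq_true] at h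
  simp only [pvMatch3, Bool.or_eq_false_iff]
  rcases h with (h | h) | h <;>
    exact ⟨pv_sw_ne f _ _ h (by decide) (by decide), pv_sw_ne f _ _ h (by decide) (by decide)⟩

theorem pv_mutex14 (f : String) (h : pvMatch1 f = true) : pvMatch4 f = false := by
  simp only [pvMatch1, Bool.or_eq_true] at h
  simp only [pvMatch4, Bool.or_eq_false_iff]
  rcases h with (h | h) | h <;>
    exact ⟨pv_sw_ne f _ _ h (by decide) (by decide), pv_sw_ne f _ _ h (by decide) (by decide)⟩

theorem pv_mutex23 (f : String) (h : pvMatch2 f = true) : pvMatch3 f = false := by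
  simp only [pvMatch2, Bool.or_eq_true] at h
  simp only [pvMatch3, Bool.or_eq_false_iff]
  rcases h with (h | h) | h <;>
    exact ⟨pv_sw_ne f _ _ h (by decide) (by decide), pv_sw_ne f _ _ h (by decide) (by decide)⟩

theorem pv_mutex24 (f : String) (h : pvMatch2 f = true) : pvMatch4 f = false := by
  simp only [pvMatch2, Bool.or_eq_true] at h
  simp only [pvMatch4, Bool.or_eq_false_iff]
  rcases h with (h | h) | h <;>
    exact ⟨pv_sw_ne f _ _ h (by decide) (by decide), pv_sw_ne f _ _ h (by decide) (by decide)⟩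

theorem pv_mutex34 (f : String) (h : pvMatch3 f = true) : pvMatch4 f = false := by
  simp only [pvMatch3, Bool.or_eq_true] at h
  simp only [pvMatch4, Bool.or_eq_false_iff]
  rcases h with h | h <;>
    exact ⟨pv_sw_ne f _ _ h (by decide) (by decide), pv_sw_ne f _ _ h (by decide) (by decide)⟩

-- the dispatch fold computes the four per-view filters
theorem pv_dispatch_eq (xs : List (String × String))
    (a b c d : List (String × String)) :
    xs.foldl pvDispatch (a, b, c, d) =
      (a ++ xs.filter (fun fc => pvMatch1 fc.1),
       b ++ xs.filter (fun fc => pvMatch2 fc.1),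
       c ++ xs.filter (fun fc => pvMatch3 fc.1),
       d ++ xs.filter (fun fc => pvMatch4 fc.1)) := by
  induction xs generalizing a b c d with
  | nil => simp
  | cons x xs ih =>
    simp only [List.foldl_cons, List.filter_cons]
    by_cases h1 : pvMatch1 x.1
    · simp [pvDispatch, h1, pv_mutex12 _ h1, pv_mutex13 _ h1, pv_mutex14 _ h1, ih]
    · by_cases h2 : pvMatch2 x.1
      · simp [pvDispatch, h1, h2, pv_mutex23 _ h2, pv_mutex24 _ h2, ih]
      · by_cases h3 : pvMatch3 x.1
        · simp [pvDispatch, h1, h2, h3, pv_mutex34 _ h3, ih]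
        · by_cases h4 : pvMatch4 x.1
          · simp [pvDispatch, h1, h2, h3, h4, ih]
          · simp [pvDispatch, h1, h2, h3, h4, ih]

-- A's inner append loop is a flatMap of the three rendered lines
theorem pv_foldl_render (xs : List (String × String)) (acc : List String) :
    xs.foldl (fun ls fc => ls ++ [(pvRender fc)[0]!] ++ [(pvRender fc)[1]!] ++ [(pvRender fc)[2]!]) acc
      = acc ++ xs.flatMap pvRender := by
  induction xs generalizing acc with
  | nil => simp
  | cons x xs ih =>
    simp only [List.foldl_cons]
    rw [ih]
    simp [pvRender, List.flatMap_cons]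

-- one section of A's accumulation equals lines ++ pvSection
theorem pv_sect (lines : List String) (name : String) (g : List (String × String)) :
    (if g ≠ [] then (lines ++ ["### " ++ name] ++ [""]) ++ g.flatMap pvRender else lines)
      = lines ++ pvSection name g := by
  by_cases h : g = [] <;> simp [pvSection, h]

-- ===== VERDICT (by name: the statement is the Claim_ definition above) =====
theorem generate_readme_section_spec : Claim_equal_generate_readme_section := by
  intro screenshots _
  show generate_readme_section screenshots = generate_readme_section_alt screenshots
  unfold generate_readme_section generate_readme_section_alt
  rw [pv_dispatch_eq]
  simp only [pvViewsA, List.foldl_cons, List.foldl_nil, pv_foldl_render, pv_sect,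
    List.nil_append]
  have h1 : (fun fc : String × String =>
      (["01-", "02-", "03-"] : List String).any (fun p => PySem.Str.startswith fc.1 p)) =
      (fun fc : String × String => pvMatch1 fc.1) := by
    funext fc; simp [pvMatch1, Bool.or_assoc]
  have h2 : (fun fc : String × String =>
      (["04-", "05-", "06-"] : List String).any (fun p => PySem.Str.startswith fc.1 p)) =
      (fun fc : String × String => pvMatch2 fc.1) := by
    funext fc; simp [pvMatch2, Bool.or_assoc]
  have h3 : (fun fc : String × String =>
      (["07-", "08-"] : List String).any (fun p => PySem.Str.startswith fc.1 p)) =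
      (fun fc : String × String => pvMatch3 fc.1) := by
    funext fc; simp [pvMatch3]
  have h4 : (fun fc : String × String =>
      (["09-", "10-"] : List String).any (fun p => PySem.Str.startswith fc.1 p)) =
      (fun fc : String × String => pvMatch4 fc.1) := by
    funext fc; simp [pvMatch4]
  rw [h1, h2, h3, h4]
  simp [pvFooter, List.append_assoc]
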